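-- pv_equiv track=rewrite | github.com/Martinacarretta/Doc-classification--2022-2023- | PROJECT.py | Count_Frequencies
-- ===== SOURCE A (Python) =====
-- def Count_Frequencies(LWords, LCategories, LKeywords):
--     LFrequencies = []
--     for i in range (0, len(LKeywords), 1):
--         LFrequencies2 = []
--         for j in range (0, len(LKeywords[i]), 1):
--             LFrequencies2.append(0)
--         LFrequencies.append(LFrequencies2)
--     #here we have set the list and how many nested lists there are
--     for element in LWords: #now we chec the words from LWords. If they are in the list of keywords, we add 1 to the index
--         for i in range (0, len(LKeywords), 1):
--             for j in range (0, len(LKeywords[i]), 1): #we have to check every nested list, otherwise, every nested list is counted as a unique element an no word would be the same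
--                 if element == LKeywords[i][j]:
--                     LFrequencies [i][j] += 1
--     return LFrequencies
-- ===== SOURCE B (Python) =====
-- def Count_Frequencies(LWords, LCategories, LKeywords):
--     counts = {}
--     for w in LWords:
--         counts[w] = counts.get(w, 0) + 1
--     return [[counts.get(kw, 0) for kw in row] for row in LKeywords]
-- ===== Notes on version B (the rewrite author's own statement) =====
-- stated objective: faster
-- what changed: Builds a word-frequency dictionary in one pass over LWords and then fills the result by direct table lookup per keyword position, instead of scanning every keyword position for every word.
import Mathlib
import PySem

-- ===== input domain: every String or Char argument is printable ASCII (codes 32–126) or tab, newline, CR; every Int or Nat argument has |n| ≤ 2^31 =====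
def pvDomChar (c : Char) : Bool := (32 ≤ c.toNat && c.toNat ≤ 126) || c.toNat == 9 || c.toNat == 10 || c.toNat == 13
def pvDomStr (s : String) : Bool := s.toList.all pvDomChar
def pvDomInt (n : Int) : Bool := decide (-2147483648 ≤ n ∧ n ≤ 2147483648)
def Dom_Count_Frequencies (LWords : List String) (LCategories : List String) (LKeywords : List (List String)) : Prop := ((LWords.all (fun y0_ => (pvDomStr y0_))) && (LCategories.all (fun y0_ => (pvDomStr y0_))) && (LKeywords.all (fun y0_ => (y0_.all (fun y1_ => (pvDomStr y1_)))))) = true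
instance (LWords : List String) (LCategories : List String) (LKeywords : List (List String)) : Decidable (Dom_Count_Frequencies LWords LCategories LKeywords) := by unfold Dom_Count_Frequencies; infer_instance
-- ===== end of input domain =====

-- B replaces A's per-word scan over every keyword position with a one-pass frequency dictionary plus direct table lookup.


-- ===== PORT A =====
-- literal transliteration of A: build a zero matrix shaped like LKeywords, then for every word
-- scan every keyword position and increment the matching cell
def Count_Frequencies (LWords : List String) (LCategories : List String) (LKeywords : List (List String)) : List (List Int) :=
  let LFrequencies :=
    (PySem.List.pyRange 0 (PySem.List.len LKeywords) 1).foldl (fun LFrequencies i =>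
      let LFrequencies2 :=
        (PySem.List.pyRange 0 (PySem.List.len (PySem.List.pyGetD LKeywords i [])) 1).foldl
          (fun LFrequencies2 _ => LFrequencies2 ++ [(0 : Int)]) []
      LFrequencies ++ [LFrequencies2]) []
  LWords.foldl (fun LFrequencies element =>
    (PySem.List.pyRange 0 (PySem.List.len LKeywords) 1).foldl (fun LFrequencies i =>
      (PySem.List.pyRange 0 (PySem.List.len (PySem.List.pyGetD LKeywords i [])) 1).foldl (fun LFrequencies j =>
        if element == PySem.List.pyGetD (PySem.List.pyGetD LKeywords i []) j "" then
          PySem.List.pySetD LFrequencies i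
            (PySem.List.pySetD (PySem.List.pyGetD LFrequencies i []) j
              (PySem.List.pyGetD (PySem.List.pyGetD LFrequencies i []) j 0 + 1))
        else LFrequencies) LFrequencies) LFrequencies) LFrequencies

-- ===== PORT B =====
-- literal transliteration of B: one counting pass over LWords into a dict, then map the keyword
-- structure through a dict lookup (missing words default to 0)
def Count_Frequencies_alt (LWords : List String) (LCategories : List String) (LKeywords : List (List String)) : List (List Int) :=
  let counts := LWords.foldl (fun d w => d.insert w (d.getD w 0 + 1)) (PySem.Dict.empty)
  LKeywords.map (fun row => row.map (fun kw => counts.getD kw 0))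

-- ===== PRECONDITION & SPEC =====
def Spec_Count_Frequencies (LWords : List String) (LCategories : List String) (LKeywords : List (List String)) (out : List (List Int)) : Prop := out = Count_Frequencies_alt LWords LCategories LKeywords
instance (LWords : List String) (LCategories : List String) (LKeywords : List (List String)) (out : List (List Int)) : Decidable (Spec_Count_Frequencies LWords LCategories LKeywords out) := by unfold Spec_Count_Frequencies; infer_instance

-- ===== CLAIM (what is proved, stated in full; the proofs are below) =====
def Claim_equal_Count_Frequencies : Prop := ∀ (LWords : List String) (LCategories : List String) (LKeywords : List (List String)), Dom_Count_Frequencies LWords LCategories LKeywords → Spec_Count_Frequencies LWords LCategories LKeywords (Count_Frequencies LWords LCategories LKeywords)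

-- ===== LEMMAS AND PROOFS =====

-- the first m positions of row fr bumped where w matches the keyword row Ki, the rest untouched
def pvBumpTo (w : String) (Ki : List String) (fr : List Int) (m : Nat) : List Int :=
  (List.zipWith (fun kw f => if w = kw then f + 1 else f) (Ki.take m) (fr.take m)) ++ fr.drop m

-- one whole row bumped at every position whose keyword equals w
def pvBump (w : String) (Ki : List String) (fr : List Int) : List Int :=
  List.zipWith (fun kw f => if w = kw then f + 1 else f) Ki fr

-- shape invariant: the frequency matrix rows match the keyword rows in length
def pvShape (K : List (List String)) (F : List (List Int)) : Prop :=
  List.Forall₂ (fun (kr : List String) (fr : List Int) => fr.length = kr.length) K F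

lemma pv_bumpTo_succ_ne (w : String) (Ki : List String) (fr : List Int) (m : Nat)
    (hm : m < Ki.length) (hl : fr.length = Ki.length) (hne : w ≠ Ki[m]) :
    pvBumpTo w Ki fr (m+1) = pvBumpTo w Ki fr m := by
  have hmf : m < fr.length := by omega
  unfold pvBumpTo
  rw [List.take_add_one (l := Ki), List.take_add_one (l := fr), List.getElem?_eq_getElem hm,
    List.getElem?_eq_getElem hmf, List.drop_eq_getElem_cons hmf (l := fr),
    List.zipWith_append (by simp; omega)]
  simp [hne]

lemma pv_bumpTo_succ_eq (w : String) (Ki : List String) (fr : List Int) (m : Nat)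
    (hm : m < Ki.length) (hl : fr.length = Ki.length) (heq : w = Ki[m]) :
    (pvBumpTo w Ki fr m).set m (fr[m]'(by omega) + 1) = pvBumpTo w Ki fr (m+1) := by
  have hmf : m < fr.length := by omega
  unfold pvBumpTo
  rw [List.take_add_one (l := Ki), List.take_add_one (l := fr), List.getElem?_eq_getElem hm,
    List.getElem?_eq_getElem hmf, List.drop_eq_getElem_cons hmf (l := fr),
    List.zipWith_append (by simp; omega)]
  have hz : (List.zipWith (fun kw f => if w = kw then f + 1 else f) (Ki.take m) (fr.take m)).length = m := by
    simp; omega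
  simp only [List.length_take, hz] at *
  simp [heq]
  have h0 : m - min Ki.length (min m fr.length) = 0 := by omega
  rw [h0, List.drop_eq_getElem_cons hmf]
  rfl

lemma pv_getD_bumpTo (w : String) (Ki : List String) (fr : List Int) (m : Nat)
    (hm : m < Ki.length) (hl : fr.length = Ki.length) :
    (pvBumpTo w Ki fr m).getD m 0 = fr[m]'(by omega) := by
  have hmf : m < fr.length := by omega
  unfold pvBumpTo
  rw [List.drop_eq_getElem_cons hmf]
  have hplen : (List.zipWith (fun kw f => if w = kw then f + 1 else f) (Ki.take m) (fr.take m)).length = m := by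
    simp; omega
  simp [List.getD, List.getElem?_append_right, hplen, List.getElem?_eq_getElem hmf]

lemma pv_bumpTo_full (w : String) (Ki : List String) (fr : List Int) (h : fr.length = Ki.length) :
    pvBumpTo w Ki fr Ki.length = pvBump w Ki fr := by
  simp [pvBumpTo, pvBump, List.take_of_length_le, h.le, List.drop_eq_nil_of_le h.le]

-- A's inner loop over row i: the first m positions of row i get bumped, everything else is untouched
lemma pv_inner (w : String) (Ki : List String) :
    ∀ (m : Nat) (G : List (List Int)) (i : Nat) (hi : i < G.length),
      m ≤ Ki.length → (G[i]).length = Ki.length →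
      (PySem.List.pyRange 0 (m : Int) 1).foldl (fun F j =>
        if w == PySem.List.pyGetD Ki j "" then
          PySem.List.pySetD F ((i : Nat) : Int)
            (PySem.List.pySetD (PySem.List.pyGetD F ((i : Nat) : Int) []) j
              (PySem.List.pyGetD (PySem.List.pyGetD F ((i : Nat) : Int) []) j 0 + 1))
        else F) G
      = G.set i (pvBumpTo w Ki G[i] m) := by
  intro m
  induction m with
  | zero =>
    intro G i hi _ _
    rw [PySem.List.pyRange_one_eq_nil (by norm_num)]
    simp [pvBumpTo, List.set_getElem_self]
  | succ m ih =>
    intro G i hi hm hlen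
    have hm' : m < Ki.length := hm
    have hcast : ((m + 1 : Nat) : Int) = (m : Int) + 1 := by push_cast; ring
    rw [hcast, PySem.List.pyRange_one_succ_right (by positivity), List.foldl_append,
      ih G i hi (le_of_lt hm') hlen]
    simp only [List.foldl_cons, List.foldl_nil]
    have hget : PySem.List.pyGetD (G.set i (pvBumpTo w Ki G[i] m)) ((i : Nat) : Int) []
        = pvBumpTo w Ki G[i] m := by
      rw [PySem.List.pyGetD_natCast]
      simp [List.getD, hi]
    rw [PySem.List.pyGetD_natCast Ki m ""]
    by_cases hw : w = Ki[m]
    · rw [if_pos (by simp [List.getElem?_eq_getElem hm', hw])]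
      rw [hget, PySem.List.pyGetD_natCast, pv_getD_bumpTo w Ki G[i] m hm' hlen,
        PySem.List.pySetD_natCast, PySem.List.pySetD_natCast,
        pv_bumpTo_succ_eq w Ki G[i] m hm' hlen hw, List.set_set]
    · rw [if_neg (by simp [List.getElem?_eq_getElem hm', hw])]
      rw [pv_bumpTo_succ_ne w Ki G[i] m hm' hlen hw]

-- A's outer loop over the first n rows: every cell of those rows whose keyword equals w is bumped
lemma pv_outer (w : String) (K : List (List String)) :
    ∀ (n : Nat) (F : List (List Int)), n ≤ K.length → pvShape K F →
      (PySem.List.pyRange 0 (n : Int) 1).foldl (fun F i =>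
        (PySem.List.pyRange 0 (PySem.List.len (PySem.List.pyGetD K i [])) 1).foldl (fun F j =>
          if w == PySem.List.pyGetD (PySem.List.pyGetD K i []) j "" then
            PySem.List.pySetD F i
              (PySem.List.pySetD (PySem.List.pyGetD F i []) j
                (PySem.List.pyGetD (PySem.List.pyGetD F i []) j 0 + 1))
          else F) F) F
      = List.zipWith (pvBump w) (K.take n) (F.take n) ++ F.drop n := by
  intro n
  induction n with
  | zero =>
    intro F _ _
    rw [PySem.List.pyRange_one_eq_nil (by norm_num)]
    simp
  | succ n ih =>
    intro F hn hshape
    have hFK : K.length = F.length := hshape.length_eq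
    have hn' : n < K.length := hn
    have hnF : n < F.length := by omega
    have hrow : F[n].length = K[n].length := by
      have hsh := hshape
      unfold pvShape at hsh
      rw [List.forall₂_iff_get] at hsh
      simpa using hsh.2 n hn' hnF
    have hcast : ((n + 1 : Nat) : Int) = (n : Int) + 1 := by push_cast; ring
    rw [hcast, PySem.List.pyRange_one_succ_right (by positivity), List.foldl_append,
      ih F (le_of_lt hn') hshape]
    simp only [List.foldl_cons, List.foldl_nil]
    set G := List.zipWith (pvBump w) (K.take n) (F.take n) ++ F.drop n with hG
    have hplen : (List.zipWith (pvBump w) (K.take n) (F.take n)).length = n := by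
      simp [pvBump]; omega
    have hGlen : G.length = F.length := by
      simp [hG, hplen]; omega
    have hGn : G[n]'(by omega) = F[n] := by
      simp [hG, List.getElem_append, hplen, Nat.sub_self, List.getElem_drop']
    have hKn : PySem.List.pyGetD K ((n : Nat) : Int) [] = K[n] := by
      rw [PySem.List.pyGetD_natCast]
      simp [List.getD, List.getElem?_eq_getElem hn']
    rw [hKn, PySem.List.len_eq]
    rw [pv_inner w K[n] K[n].length G n (by omega) le_rfl (by rw [hGn]; exact hrow)]
    rw [hGn, pv_bumpTo_full w K[n] F[n] hrow]
    rw [hG, List.set_append]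
    rw [if_neg (by omega), hplen]
    rw [List.take_add_one (l := K), List.take_add_one (l := F),
      List.getElem?_eq_getElem hn', List.getElem?_eq_getElem hnF,
      List.zipWith_append (by simp; omega),
      List.drop_eq_getElem_cons hnF (l := F)]
    simp
    rw [List.drop_eq_getElem_cons hnF (l := F)]
    rfl

lemma pv_shape_bump (w : String) (K : List (List String)) (F : List (List Int))
    (h : pvShape K F) : pvShape K (List.zipWith (pvBump w) K F) := by
  unfold pvShape at *
  induction h with
  | nil => simp
  | cons hkf _ ih =>
    refine List.Forall₂.cons ?_ ih
    simp [pvBump]; omega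

lemma pv_zip_comp (g h : List String → List Int → List Int) :
    ∀ (K : List (List String)) (F : List (List Int)),
      List.zipWith g K (List.zipWith h K F) = List.zipWith (fun kr fr => g kr (h kr fr)) K F := by
  intro K
  induction K with
  | nil => simp
  | cons kr K ih => intro F; cases F <;> simp [ih]

lemma pv_mat_congr (g h : List String → List Int → List Int) (K : List (List String))
    (F : List (List Int)) (hs : pvShape K F)
    (hgh : ∀ kr fr, fr.length = kr.length → g kr fr = h kr fr) :
    List.zipWith g K F = List.zipWith h K F := by
  unfold pvShape at hs
  induction hs with
  | nil => simp
  | cons hkf _ ih => simp [hgh _ _ hkf, ih]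

lemma pv_row_nil (kr : List String) : ∀ (fr : List Int), fr.length = kr.length →
    List.zipWith (fun kw f => f + (List.count kw ([] : List String) : Int)) kr fr = fr := by
  induction kr with
  | nil => intro fr h; simp_all [List.length_eq_zero_iff]
  | cons kw kr ih => intro fr h; cases fr <;> simp_all

lemma pv_step_row (w : String) (ws : List String) (kr : List String) :
    ∀ (fr : List Int), fr.length = kr.length →
      List.zipWith (fun kw f => f + (List.count kw (w :: ws) : Int)) kr fr
      = List.zipWith (fun kw f => f + (List.count kw ws : Int)) kr (pvBump w kr fr) := by
  induction kr with
  | nil => intro fr h; simp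
  | cons kw kr ih =>
    intro fr h
    cases fr with
    | nil => simp at h
    | cons f fr =>
      simp only [pvBump] at *
      simp only [List.zipWith_cons_cons, ih fr (by simpa using h)]
      congr 1
      rw [List.count_cons]
      by_cases hw : w = kw
      · simp [hw]; push_cast; ring
      · simp [hw]

lemma pv_zip_snd : ∀ (K : List (List String)) (F : List (List Int)), pvShape K F →
    List.zipWith (fun kr fr => fr) K F = F := by
  intro K F hs
  unfold pvShape at hs
  induction hs with
  | nil => simp
  | cons _ _ ih => simp [ih]

-- A's word loop, with each word's double scan already reduced to pvBump, counts every keyword position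
lemma pv_fold_words (K : List (List String))
    (body : List (List Int) → String → List (List Int))
    (hbody : ∀ F w, pvShape K F → body F w = List.zipWith (pvBump w) K F) :
    ∀ (ws : List String) (F : List (List Int)), pvShape K F →
      ws.foldl body F
      = List.zipWith (fun kr fr => List.zipWith (fun kw f => f + (List.count kw ws : Int)) kr fr) K F := by
  intro ws
  induction ws with
  | nil =>
    intro F hs
    simp only [List.foldl_nil]
    rw [pv_mat_congr _ (fun kr fr => fr) K F hs (fun kr fr h => pv_row_nil kr fr h)]
    exact (pv_zip_snd K F hs).symm
  | cons w ws ih =>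
    intro F hs
    simp only [List.foldl_cons]
    rw [hbody F w hs, ih _ (pv_shape_bump w K F hs), pv_zip_comp]
    exact (pv_mat_congr _ _ K F hs (fun kr fr h => pv_step_row w ws kr fr h)).symm

lemma pv_rep : ∀ (l : List Int) (acc : List Int),
    l.foldl (fun r _ => r ++ [(0 : Int)]) acc = acc ++ List.replicate l.length 0 := by
  intro l
  induction l with
  | nil => simp
  | cons x l ih =>
    intro acc
    rw [List.foldl_cons, ih, List.append_assoc]
    simp [List.replicate_succ]

-- A's initialisation pass builds the zero matrix shaped like K
lemma pv_init (K : List (List String)) :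
    (PySem.List.pyRange 0 (PySem.List.len K) 1).foldl (fun LFrequencies i =>
      LFrequencies ++ [(PySem.List.pyRange 0 (PySem.List.len (PySem.List.pyGetD K i [])) 1).foldl
          (fun LFrequencies2 _ => LFrequencies2 ++ [(0 : Int)]) []]) []
    = K.map (fun r => r.map (fun _ => (0 : Int))) := by
  rw [PySem.List.foldl_pyRange_zero_pyGetD K []
    (fun F row => F ++ [(PySem.List.pyRange 0 (PySem.List.len row) 1).foldl
      (fun r _ => r ++ [(0 : Int)]) []]) []]
  rw [PySem.List.foldl_append_singleton_eq_map]
  simp only [List.nil_append]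
  apply List.map_congr_left
  intro r _
  rw [pv_rep]
  simp [PySem.List.length_pyRange_one, List.map_const']

lemma pv_shape_zero (K : List (List String)) :
    pvShape K (K.map (fun r => r.map (fun _ => (0 : Int)))) := by
  unfold pvShape
  induction K with
  | nil => simp
  | cons r K ih => exact List.Forall₂.cons (by simp) ih

lemma pv_row_zero (c : String → Int) : ∀ (kr : List String),
    List.zipWith (fun kw f => f + c kw) kr (kr.map (fun _ => (0 : Int))) = kr.map (fun kw => c kw) := by
  intro kr
  induction kr with
  | nil => simp
  | cons kw kr ih =>
    simp only [List.map_cons, List.zipWith_cons_cons, zero_add, ih]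

lemma pv_final (W : List String) : ∀ (K : List (List String)),
    List.zipWith (fun kr fr => List.zipWith (fun kw f => f + (List.count kw W : Int)) kr fr) K
      (K.map (fun r => r.map (fun _ => (0 : Int))))
    = K.map (fun row => row.map (fun kw => (PySem.Dict.counter W).getD kw 0)) := by
  intro K
  induction K with
  | nil => simp
  | cons r K ih =>
    simp only [List.map_cons, List.zipWith_cons_cons, ih, List.cons.injEq, and_true]
    rw [pv_row_zero (fun kw => (List.count kw W : Int)) r]
    apply List.map_congr_left
    intro kw _
    rw [PySem.Dict.getD_counter]

lemma pv_body_eq (K : List (List String)) (w : String) (F : List (List Int)) (hs : pvShape K F) :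
    (PySem.List.pyRange 0 (PySem.List.len K) 1).foldl (fun F i =>
      (PySem.List.pyRange 0 (PySem.List.len (PySem.List.pyGetD K i [])) 1).foldl (fun F j =>
        if w == PySem.List.pyGetD (PySem.List.pyGetD K i []) j "" then
          PySem.List.pySetD F i
            (PySem.List.pySetD (PySem.List.pyGetD F i []) j
              (PySem.List.pyGetD (PySem.List.pyGetD F i []) j 0 + 1))
        else F) F) F
    = List.zipWith (pvBump w) K F := by
  have hFK : K.length = F.length := hs.length_eq
  rw [PySem.List.len_eq, pv_outer w K K.length F le_rfl hs]
  rw [List.take_of_length_le le_rfl, List.take_of_length_le hFK.ge,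
    List.drop_eq_nil_of_le hFK.ge]
  simp

-- ===== VERDICT (by name: the statement is the Claim_ definition above) =====
theorem Count_Frequencies_spec : Claim_equal_Count_Frequencies := by
  intro LWords LCategories LKeywords _
  unfold Spec_Count_Frequencies Count_Frequencies Count_Frequencies_alt
  dsimp only
  rw [pv_init, PySem.Dict.foldl_insert_getD_add_one_eq_counter]
  rw [pv_fold_words LKeywords _ (fun F w hs => pv_body_eq LKeywords w F hs) LWords _
    (pv_shape_zero LKeywords)]
  exact pv_final LWords LKeywords
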